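-- pv_equiv track=rewrite | github.com/NolanCSE/PokTTPRG | RandomPokemonGenerator/PDFReader/PokedexCSVToYaml.py | checkNumDigits
-- ===== SOURCE A (Python) =====
-- def checkNumDigits(text : str):
--     count = 0
--     maybe = False
--     for character in text:
--         if character.isdigit():
--             if maybe:
--                 return 2
--             count += 1
--         elif character == "A":
--             maybe = True
--         else:
--             return count
--     return count
-- ===== SOURCE B (Python) =====
-- from itertools import takewhile, dropwhile
--
-- def checkNumDigits(text: str):
--     # Extract the leading run of digit/'A' characters, then decide in separate passes.
--     prefix = list(takewhile(lambda c: c.isdigit() or c == 'A', text))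
--     after_first_A = list(dropwhile(lambda c: c != 'A', prefix))[1:]
--     if any(c.isdigit() for c in after_first_A):
--         return 2
--     return sum(c.isdigit() for c in prefix)
-- ===== Notes on version B (the rewrite author's own statement) =====
-- stated objective: alternative
-- what changed: Replaces the early-exit state machine (count + maybe flag) with a declarative decomposition: take the leading run of digits/letter-A characters, drop up to the first letter A, return 2 if any digit follows it, otherwise count the digits in the run.
import Mathlib
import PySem

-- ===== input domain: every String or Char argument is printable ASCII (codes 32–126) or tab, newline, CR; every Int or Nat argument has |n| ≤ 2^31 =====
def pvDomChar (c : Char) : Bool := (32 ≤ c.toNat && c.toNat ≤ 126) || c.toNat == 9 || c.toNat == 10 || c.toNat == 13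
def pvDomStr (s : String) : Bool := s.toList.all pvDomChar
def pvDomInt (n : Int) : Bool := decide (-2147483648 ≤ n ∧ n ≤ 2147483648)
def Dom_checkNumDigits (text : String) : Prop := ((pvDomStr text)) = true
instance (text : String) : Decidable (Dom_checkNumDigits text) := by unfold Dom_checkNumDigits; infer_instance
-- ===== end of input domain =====

-- B replaces A's early-exit state machine by "take the digit/'A' prefix, then separate passes" (objective: alternative; same cost).

-- ===== PORT A =====
-- the for-loop with early returns, as structural recursion over (count, maybe)
def checkNumDigitsLoop (cs : List Char) (count : Int) (maybe : Bool) : Int :=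
  match cs with
  | [] => count
  | c :: rest =>
    if PySem.Chars.isdigit c then
      if maybe then 2 else checkNumDigitsLoop rest (count + 1) maybe
    else if c = 'A' then checkNumDigitsLoop rest count true
    else count

def checkNumDigits (text : String) : Int :=
  checkNumDigitsLoop text.toList 0 false

-- ===== PORT B =====
-- takewhile → List.takeWhile; dropwhile → List.dropWhile; [1:] on a list = List.drop 1;
-- sum of the isdigit booleans = List.countP isdigit
def checkNumDigits_alt (text : String) : Int :=
  let pfx := text.toList.takeWhile (fun c => PySem.Chars.isdigit c || c == 'A')
  let afterFirstA := (pfx.dropWhile (fun c => !(c == 'A'))).drop 1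
  if afterFirstA.any PySem.Chars.isdigit then 2
  else (pfx.countP PySem.Chars.isdigit : Int)

-- ===== PRECONDITION & SPEC =====
def Spec_checkNumDigits (text : String) (out : Int) : Prop := out = checkNumDigits_alt text
instance (text : String) (out : Int) : Decidable (Spec_checkNumDigits text out) := by unfold Spec_checkNumDigits; infer_instance

-- ===== CLAIM (what is proved, stated in full; the proofs are below) =====
def Claim_equal_checkNumDigits : Prop := ∀ (text : String), Dom_checkNumDigits text → Spec_checkNumDigits text (checkNumDigits text)

-- ===== LEMMAS AND PROOFS =====

-- once maybe = true, A returns 2 iff some digit remains in the leading digit/'A' run, else count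
theorem checkNumDigitsLoop_true (cs : List Char) (count : Int) :
    checkNumDigitsLoop cs count true =
      if (cs.takeWhile (fun c => PySem.Chars.isdigit c || c == 'A')).any PySem.Chars.isdigit
      then 2 else count := by
  induction cs generalizing count with
  | nil => simp [checkNumDigitsLoop]
  | cons c rest ih =>
    by_cases hd : PySem.Chars.isdigit c = true
    · simp [checkNumDigitsLoop, hd]
    · by_cases hA : c = 'A'
      · subst hA
        simp [checkNumDigitsLoop, PySem.Chars.isdigit, ih]
      · have hb : (c == 'A') = false := by simp [hA]
        simp [checkNumDigitsLoop, hd, hA, hb]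

-- main invariant of A's loop in maybe = false state, against B's decomposition
theorem checkNumDigitsLoop_false (cs : List Char) (count : Int) :
    checkNumDigitsLoop cs count false =
      (let pfx := cs.takeWhile (fun c => PySem.Chars.isdigit c || c == 'A')
       if ((pfx.dropWhile (fun c => !(c == 'A'))).drop 1).any PySem.Chars.isdigit then 2
       else count + (pfx.countP PySem.Chars.isdigit : Int)) := by
  induction cs generalizing count with
  | nil => simp [checkNumDigitsLoop]
  | cons c rest ih =>
    by_cases hd : PySem.Chars.isdigit c = true
    · have hb : (c == 'A') = false := by
        simp only [beq_eq_false_iff_ne]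
        intro h; subst h; simp [PySem.Chars.isdigit] at hd
      simp only [checkNumDigitsLoop, hd, if_true, ih]
      simp only [List.takeWhile_cons, hd, Bool.true_or, if_true,
        List.dropWhile_cons, hb, Bool.not_false, List.countP_cons]
      by_cases h : (((rest.takeWhile (fun c => PySem.Chars.isdigit c || c == 'A')).dropWhile
          (fun c => !(c == 'A'))).drop 1).any PySem.Chars.isdigit = true
      · rw [if_pos h, if_pos h]
        simp
      · rw [if_neg h, if_neg h]
        push_cast; ring
    · by_cases hA : c = 'A'
      · subst hA
        rw [checkNumDigitsLoop]
        rw [if_neg (by decide), if_pos rfl, checkNumDigitsLoop_true]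
        simp only [List.takeWhile_cons]
        rw [if_pos (show (PySem.Chars.isdigit 'A' || (('A' : Char) == 'A')) = true by decide),
          List.dropWhile_cons,
          if_neg (show ¬((!(('A' : Char) == 'A')) = true) by decide),
          List.drop_one, List.tail_cons]
        by_cases h : ((rest.takeWhile (fun c => PySem.Chars.isdigit c || c == 'A')).any
            PySem.Chars.isdigit) = true
        · rw [if_pos h, if_pos h]
        · rw [if_neg h, if_neg h]
          have hcount : (rest.takeWhile (fun c => PySem.Chars.isdigit c || c == 'A')).countP
              PySem.Chars.isdigit = 0 := by
            rw [List.countP_eq_zero]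
            intro a ha
            rw [List.any_eq_true] at h
            exact fun hc2 => h ⟨a, ha, hc2⟩
          rw [List.countP_cons, hcount]
          norm_num [PySem.Chars.isdigit]
      · have hp : (PySem.Chars.isdigit c || c == 'A') = false := by simp [hd, hA]
        simp [checkNumDigitsLoop, hd, hA]

-- ===== VERDICT (by name: the statement is the Claim_ definition above) =====
theorem checkNumDigits_spec : Claim_equal_checkNumDigits := by
  intro text _
  unfold Spec_checkNumDigits checkNumDigits checkNumDigits_alt
  rw [checkNumDigitsLoop_false]
  simp
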